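-- pv_equiv track=rewrite | github.com/codelotusr/VACathon | src/ast_utils.py | k_hop_slice_mask
-- ===== SOURCE A (Python) =====
-- from typing import Dict, List, Optional, Set
--
-- def k_hop_slice_mask(
--     n_nodes: int,
--     node_to_line: Dict[int, int],
--     start_lines: List[int],
--     k_hops: int,
--     edges: List[tuple[int, int]],
-- ) -> List[bool]:
--     """
--     Keep nodes within k preorder-hops (undirected) from any node mapped to sink lines.
--     Preorder index is already a strong locality signal; this is a pragmatic approximation.
--
--     Returns boolean mask length n_nodes.
--     """
--     if n_nodes == 0 or not start_lines:
--         return [True] * n_nodes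
--
--     # Map sink lines -> candidate node indices
--     seeds: List[int] = [
--         idx for idx, ln in node_to_line.items() if ln in set(start_lines)
--     ]
--     if not seeds:
--         return [True] * n_nodes
--
--     # undirected adjacency on preorder indices
--     adj: List[List[int]] = [[] for _ in range(n_nodes)]
--     for a, b in edges:
--         if 0 <= a < n_nodes and 0 <= b < n_nodes:
--             adj[a].append(b)
--             adj[b].append(a)
--
--     from collections import deque
--
--     dist = [-1] * n_nodes
--     q = deque()
--     for s in seeds:
--         dist[s] = 0
--         q.append(s)
--     while q:
--         u = q.popleft()
--         if dist[u] >= k_hops: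
--             continue
--         for v in adj[u]:
--             if dist[v] == -1:
--                 dist[v] = dist[u] + 1
--                 q.append(v)
--     return [d != -1 and d <= k_hops for d in dist]
-- ===== SOURCE B (Python) =====
-- def k_hop_slice_mask(
--     n_nodes,
--     node_to_line,
--     start_lines,
--     k_hops,
--     edges,
-- ):
--     """Round-based set expansion: no adjacency list, no queue, no distance array.
--     Each round scans the (pre-filtered) edge list once and grows the visited set;
--     stops after k_hops rounds or when the set stops growing.
--     Nothing is within a negative distance, so k_hops < 0 yields an all-False mask."""
--     if n_nodes == 0 or not start_lines:
--         return [True] * n_nodes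
--     targets = set(start_lines)
--     seeds = [idx for idx, ln in node_to_line.items() if ln in targets]
--     if not seeds:
--         return [True] * n_nodes
--     if k_hops < 0:
--         return [False] * n_nodes
--     valid = [(a, b) for a, b in edges if 0 <= a < n_nodes and 0 <= b < n_nodes]
--     visited = set(seeds)
--     hops = 0
--     while hops < k_hops:
--         nxt = set()
--         for a, b in valid:
--             if a in visited and b not in visited:
--                 nxt.add(b)
--             if b in visited and a not in visited:
--                 nxt.add(a)
--         if not nxt:
--             break
--         visited |= nxt
--         hops += 1
--     return [i in visited for i in range(n_nodes)]
-- ===== Notes on version B (the rewrite author's own statement) =====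
-- stated objective: faster
-- what changed: Replaces A's adjacency-list construction plus deque BFS with a distance array by round-based set expansion (each of at most k_hops rounds scans the pre-filtered edge list once, stopping early at saturation; the mask is membership in the final visited set, all-False for negative k_hops), and hoists set(start_lines) out of the seed comprehension, which A rebuilds for every dict item.
-- outside the precondition, e.g. on k_hop_slice_mask(2, {-1: 5}, [5], 0, []): A returns [False, True], B returns [False, False]
import Mathlib
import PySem

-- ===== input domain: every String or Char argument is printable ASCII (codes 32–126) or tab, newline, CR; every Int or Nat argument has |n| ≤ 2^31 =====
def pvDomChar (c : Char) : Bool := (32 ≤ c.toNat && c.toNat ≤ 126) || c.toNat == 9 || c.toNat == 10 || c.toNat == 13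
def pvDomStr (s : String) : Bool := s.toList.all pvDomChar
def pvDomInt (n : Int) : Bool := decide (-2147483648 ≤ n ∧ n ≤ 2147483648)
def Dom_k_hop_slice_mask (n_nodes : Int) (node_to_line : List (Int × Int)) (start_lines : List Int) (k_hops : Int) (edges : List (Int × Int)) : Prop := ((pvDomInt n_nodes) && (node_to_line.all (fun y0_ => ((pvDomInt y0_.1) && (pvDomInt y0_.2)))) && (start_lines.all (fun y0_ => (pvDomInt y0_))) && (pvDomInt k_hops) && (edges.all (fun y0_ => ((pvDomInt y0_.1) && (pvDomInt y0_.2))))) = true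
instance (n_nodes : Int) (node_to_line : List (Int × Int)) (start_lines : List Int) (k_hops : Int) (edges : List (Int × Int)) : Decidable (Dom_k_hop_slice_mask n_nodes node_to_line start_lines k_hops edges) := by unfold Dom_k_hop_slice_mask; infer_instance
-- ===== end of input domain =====

-- B replaces A's adjacency-list + deque BFS with round-based set expansion over the
-- pre-filtered edge list and hoists set(start_lines) out of the seed comprehension
-- (objective: faster, measured; same observable results).

-- ===== PORT A =====
-- seeds = [idx for idx, ln in node_to_line.items() if ln in set(start_lines)]  (identical line in A and B)
def pvSeeds (node_to_line : List (Int × Int)) (start_lines : List Int) : List Int :=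
  ((PySem.Dict.ofList node_to_line).items.filter
      (fun p => PySem.Set.contains (PySem.Set.ofList start_lines) p.2)).map (fun p => p.1)

-- for a, b in edges: if 0 <= a < n and 0 <= b < n: adj[a].append(b); adj[b].append(a)
def pvAdjStep (n_nodes : Int) (adj : List (List Int)) (p : Int × Int) : List (List Int) :=
  if 0 ≤ p.1 ∧ p.1 < n_nodes ∧ 0 ≤ p.2 ∧ p.2 < n_nodes then
    let adj1 := PySem.List.pySetD adj p.1 (PySem.List.pyGetD adj p.1 [] ++ [p.2])
    PySem.List.pySetD adj1 p.2 (PySem.List.pyGetD adj1 p.2 [] ++ [p.1])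
  else adj

-- for v in adj[u]: if dist[v] == -1: dist[v] = dist[u] + 1; q.append(v)
def pvAinner (dist : List Int) (q : List Int) (u : Int) : List Int → List Int × List Int
  | [] => (dist, q)
  | v :: rest =>
    if PySem.List.pyGetD dist v (-1) = -1 then
      pvAinner (PySem.List.pySetD dist v (PySem.List.pyGetD dist u (-1) + 1)) (q ++ [v]) u rest
    else pvAinner dist q u rest

-- while q: u = q.popleft(); if dist[u] >= k_hops: continue; <inner loop>
-- (fuel only makes the recursion structural; it is provably never exhausted from the entry call)
def pvAloop (k_hops : Int) (adj : List (List Int)) : Nat → List Int → List Int → List Int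
  | 0, dist, _ => dist
  | _ + 1, dist, [] => dist
  | fuel + 1, dist, u :: q =>
    if k_hops ≤ PySem.List.pyGetD dist u (-1) then pvAloop k_hops adj fuel dist q
    else
      let s := pvAinner dist q u (PySem.List.pyGetD adj u [])
      pvAloop k_hops adj fuel s.1 s.2

def k_hop_slice_mask (n_nodes : Int) (node_to_line : List (Int × Int)) (start_lines : List Int) (k_hops : Int) (edges : List (Int × Int)) : List Bool :=
  if n_nodes = 0 ∨ start_lines = [] then List.replicate n_nodes.toNat true
  else
    let seeds := pvSeeds node_to_line start_lines
    if seeds = [] then List.replicate n_nodes.toNat true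
    else
      let adj := edges.foldl (pvAdjStep n_nodes) (List.replicate n_nodes.toNat ([] : List Int))
      let init := seeds.foldl (fun dq s => (PySem.List.pySetD dq.1 s 0, dq.2 ++ [s]))
                    (List.replicate n_nodes.toNat (-1 : Int), ([] : List Int))
      let dist := pvAloop k_hops adj (n_nodes.toNat + seeds.length) init.1 init.2
      dist.map (fun d => decide (¬ d = -1 ∧ d ≤ k_hops))

-- ===== PORT B =====
-- valid = [(a, b) for a, b in edges if 0 <= a < n_nodes and 0 <= b < n_nodes]
def pvValid (n_nodes : Int) (edges : List (Int × Int)) : List (Int × Int) :=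
  edges.filter (fun p => decide (0 ≤ p.1 ∧ p.1 < n_nodes ∧ 0 ≤ p.2 ∧ p.2 < n_nodes))

-- one round: nxt = unvisited endpoints of edges whose other endpoint is visited
def pvRound (valid : List (Int × Int)) (visited : PySem.Set Int) : PySem.Set Int :=
  valid.foldl (fun nxt p =>
    let nxt1 := if PySem.Set.contains visited p.1 && !PySem.Set.contains visited p.2
      then PySem.Set.add nxt p.2 else nxt
    if PySem.Set.contains visited p.2 && !PySem.Set.contains visited p.1
      then PySem.Set.add nxt1 p.1 else nxt1) PySem.Set.empty

-- while hops < k_hops: nxt = round(); if not nxt: break; visited |= nxt; hops += 1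
-- (the loop runs at most (k_hops - hops) rounds; that trip count makes the recursion structural)
def pvBloopT (valid : List (Int × Int)) : Nat → PySem.Set Int → PySem.Set Int
  | 0, visited => visited
  | t + 1, visited =>
    let nxt := pvRound valid visited
    if nxt = [] then visited
    else pvBloopT valid t (PySem.Set.union visited nxt)

def pvBloop (valid : List (Int × Int)) (visited : PySem.Set Int) (hops k_hops : Int) : PySem.Set Int :=
  pvBloopT valid (k_hops - hops).toNat visited

def k_hop_slice_mask_alt (n_nodes : Int) (node_to_line : List (Int × Int)) (start_lines : List Int) (k_hops : Int) (edges : List (Int × Int)) : List Bool :=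
  if n_nodes = 0 ∨ start_lines = [] then List.replicate n_nodes.toNat true
  else
    let seeds := pvSeeds node_to_line start_lines
    if seeds = [] then List.replicate n_nodes.toNat true
    else if k_hops < 0 then List.replicate n_nodes.toNat false
    else
      let visited := pvBloop (pvValid n_nodes edges) (PySem.Set.ofList seeds) 0 k_hops
      (PySem.List.pyRange 0 n_nodes 1).map (fun i => PySem.Set.contains visited i)

-- ===== PRECONDITION & SPEC =====
-- Pre_ restricts the dict entries that act as seeds to valid node ids [0, n_nodes):
-- on malformed node ids A raises IndexError (seed < -n_nodes or >= n_nodes) or silently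
-- wraps a negative seed Python-style (dist[-1] marks node n_nodes-1), an artefact of
-- list indexing that B (which only ever looks up ids 0..n_nodes-1) does not reproduce.
def Pre_k_hop_slice_mask (n_nodes : Int) (node_to_line : List (Int × Int)) (start_lines : List Int) (k_hops : Int) (edges : List (Int × Int)) : Prop :=
  n_nodes = 0 ∨ ∀ p ∈ (PySem.Dict.ofList node_to_line).items, p.2 ∈ start_lines → 0 ≤ p.1 ∧ p.1 < n_nodes
instance (n_nodes : Int) (node_to_line : List (Int × Int)) (start_lines : List Int) (k_hops : Int) (edges : List (Int × Int)) : Decidable (Pre_k_hop_slice_mask n_nodes node_to_line start_lines k_hops edges) := by unfold Pre_k_hop_slice_mask; infer_instance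

def pvWitness_k_hop_slice_mask : Int × (List (Int × Int)) × List Int × Int × (List (Int × Int)) :=
  (2, [(0, 10)], [10], 1, [(0, 1)])

def Spec_k_hop_slice_mask (n_nodes : Int) (node_to_line : List (Int × Int)) (start_lines : List Int) (k_hops : Int) (edges : List (Int × Int)) (out : List Bool) : Prop := out = k_hop_slice_mask_alt n_nodes node_to_line start_lines k_hops edges
instance (n_nodes : Int) (node_to_line : List (Int × Int)) (start_lines : List Int) (k_hops : Int) (edges : List (Int × Int)) (out : List Bool) : Decidable (Spec_k_hop_slice_mask n_nodes node_to_line start_lines k_hops edges out) := by unfold Spec_k_hop_slice_mask; infer_instance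

-- ===== CLAIM (what is proved, stated in full; the proofs are below) =====
def Claim_equal_k_hop_slice_mask : Prop := ∀ (n_nodes : Int) (node_to_line : List (Int × Int)) (start_lines : List Int) (k_hops : Int) (edges : List (Int × Int)), Dom_k_hop_slice_mask n_nodes node_to_line start_lines k_hops edges → Pre_k_hop_slice_mask n_nodes node_to_line start_lines k_hops edges → Spec_k_hop_slice_mask n_nodes node_to_line start_lines k_hops edges (k_hop_slice_mask n_nodes node_to_line start_lines k_hops edges)

-- ===== LEMMAS AND PROOFS =====

def pvReach (seeds : List Int) (valid : List (Int × Int)) : Nat → Int → Prop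
  | 0, v => v ∈ seeds
  | i + 1, v => pvReach seeds valid i v ∨ ∃ u, pvReach seeds valid i u ∧ ((u, v) ∈ valid ∨ (v, u) ∈ valid)

def pvExact (seeds : List Int) (valid : List (Int × Int)) (i : Nat) (v : Int) : Prop :=
  pvReach seeds valid i v ∧ ∀ j, j < i → ¬ pvReach seeds valid j v

theorem pvReach_mono (seeds : List Int) (valid : List (Int × Int)) {i j : Nat} (hij : i ≤ j)
    {v : Int} (h : pvReach seeds valid i v) : pvReach seeds valid j v := by
  induction j with
  | zero => have : i = 0 := by omega
            subst this; exact h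
  | succ j ih =>
      by_cases hc : i = j + 1
      · subst hc; exact h
      · exact Or.inl (ih (by omega))

theorem pvReach_sat (seeds : List Int) (valid : List (Int × Int)) {i : Nat}
    (h : ∀ v, pvReach seeds valid (i + 1) v → pvReach seeds valid i v) :
    ∀ j, i ≤ j → ∀ v, (pvReach seeds valid j v ↔ pvReach seeds valid i v) := by
  intro j
  induction j with
  | zero => intro hij v
            have : i = 0 := by omega
            subst this; exact Iff.rfl
  | succ j ih =>
      intro hij v
      by_cases hc : i = j + 1
      · subst hc; exact Iff.rfl
      · have hij' : i ≤ j := by omega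
        constructor
        · rintro (hr | ⟨u, hu, he⟩)
          · exact (ih hij' v).mp hr
          · exact h v (Or.inr ⟨u, (ih hij' u).mp hu, he⟩)
        · intro hr; exact Or.inl ((ih hij' v).mpr hr)

theorem pvValid_mem {n : Int} {edges : List (Int × Int)} {p : Int × Int}
    (h : p ∈ pvValid n edges) : p ∈ edges ∧ 0 ≤ p.1 ∧ p.1 < n ∧ 0 ≤ p.2 ∧ p.2 < n := by
  have := List.mem_filter.mp h
  simpa using this

theorem pvReach_range {n : Int} {seeds : List Int} {edges : List (Int × Int)}
    (hs : ∀ s ∈ seeds, 0 ≤ s ∧ s < n) :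
    ∀ (i : Nat) (v : Int), pvReach seeds (pvValid n edges) i v → 0 ≤ v ∧ v < n := by
  intro i
  induction i with
  | zero => intro v hv; exact hs v hv
  | succ i ih =>
      rintro v (hr | ⟨u, _, (he | he)⟩)
      · exact ih v hr
      · have := pvValid_mem he; exact ⟨this.2.2.2.1, this.2.2.2.2⟩
      · have := pvValid_mem he; exact ⟨this.2.1, this.2.2.1⟩

-- generic get-of-set for Python list indexing (both indices nonnegative and in range)

theorem pvGetSet {α : Type} (l : List α) (a x : Int) (w d : α)
    (ha0 : 0 ≤ a) (ha : a < l.length) (hx0 : 0 ≤ x) (hx : x < l.length) :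
    PySem.List.pyGetD (PySem.List.pySetD l a w) x d = if x = a then w else PySem.List.pyGetD l x d := by
  rw [PySem.List.pySetD_of_nonneg l w ha0]
  by_cases hxa : x = a
  · subst hxa
    rw [if_pos rfl, PySem.List.pyGetD_eq_getElem _ _ hx0 (by simpa using hx)]
    simp [List.getElem_set]
  · rw [if_neg hxa,
        PySem.List.pyGetD_eq_getElem _ _ hx0 (by simpa using hx),
        PySem.List.pyGetD_eq_getElem _ _ hx0 (by simpa using hx)]
    rw [List.getElem_set_ne (by omega)]

theorem pvCountSet (w : Int) (hw : w ≠ -1) :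
    ∀ (l : List Int) (m : Nat), m < l.length → l[m]! = -1 →
      (l.set m w).count (-1) + 1 = l.count (-1) := by
  intro l
  induction l with
  | nil => intro m hm; simp at hm
  | cons x t ih =>
      intro m hm hx
      cases m with
      | zero =>
          simp only [List.getElem!_cons_zero] at hx
          subst hx
          simp [List.count_cons, hw]
      | succ m =>
          simp only [List.getElem!_cons_succ] at hx
          have := ih m (by simpa using hm) hx
          simp [List.count_cons]
          split <;> omega

theorem pvInitLen : ∀ (ss : List Int) (dist : List Int),
    (ss.foldl (fun d s => PySem.List.pySetD d s 0) dist).length = dist.length := by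
  intro ss
  induction ss with
  | nil => intro dist; rfl
  | cons s t ih => intro dist; rw [List.foldl_cons, ih, PySem.List.length_pySetD]

theorem pvInitGet (n : Int) : ∀ (ss : List Int) (dist : List Int),
    dist.length = n.toNat → (∀ s ∈ ss, 0 ≤ s ∧ s < n) →
    ∀ j : Int, 0 ≤ j → j < n →
    PySem.List.pyGetD (ss.foldl (fun d s => PySem.List.pySetD d s 0) dist) j (-1)
      = if j ∈ ss then 0 else PySem.List.pyGetD dist j (-1) := by
  intro ss
  induction ss with
  | nil => intro dist _ _ j _ _; simp
  | cons s t ih =>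
      intro dist hlen hss j hj0 hjn
      rw [List.foldl_cons]
      have hs := hss s (by simp)
      have hlen' : (PySem.List.pySetD dist s 0).length = n.toNat := by
        rw [PySem.List.length_pySetD]; exact hlen
      rw [ih _ hlen' (fun x hx => hss x (by simp [hx])) j hj0 hjn]
      have hgs : PySem.List.pyGetD (PySem.List.pySetD dist s 0) j (-1)
          = if j = s then 0 else PySem.List.pyGetD dist j (-1) := by
        apply pvGetSet dist s j 0 (-1) hs.1 (by rw [hlen]; omega) hj0 (by rw [hlen]; omega)
      by_cases hjt : j ∈ t
      · simp [hjt]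
      · by_cases hjs : j = s
        · subst hjs; simp only [hjt, List.mem_cons, or_false]
          simp [hgs]
        · simp [hjt, hjs, hgs]

theorem pvAdjStep_len (n : Int) (adj : List (List Int)) (p : Int × Int) :
    (pvAdjStep n adj p).length = adj.length := by
  unfold pvAdjStep
  split
  · rw [PySem.List.length_pySetD, PySem.List.length_pySetD]
  · rfl

theorem pvAdjStep_mem (n : Int) (adj : List (List Int)) (e : Int × Int)
    (hlen : adj.length = n.toNat)
    (he : 0 ≤ e.1 ∧ e.1 < n ∧ 0 ≤ e.2 ∧ e.2 < n)
    (x v : Int) (hx0 : 0 ≤ x) (hxn : x < n) :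
    v ∈ PySem.List.pyGetD (pvAdjStep n adj e) x []
      ↔ v ∈ PySem.List.pyGetD adj x [] ∨ (x = e.1 ∧ v = e.2) ∨ (x = e.2 ∧ v = e.1) := by
  have hL : (n.toNat : Int) = n := by omega
  have h1 : e.1 < (adj.length : Int) := by rw [hlen]; omega
  have h2 : e.2 < (adj.length : Int) := by rw [hlen]; omega
  have hx : x < (adj.length : Int) := by rw [hlen]; omega
  have hlen1 : (PySem.List.pySetD adj e.1 (PySem.List.pyGetD adj e.1 [] ++ [e.2])).length = adj.length :=
    PySem.List.length_pySetD _ _ _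
  unfold pvAdjStep
  rw [if_pos he]
  rw [pvGetSet _ e.2 x _ [] he.2.2.1 (by rw [hlen1]; exact h2) hx0 (by rw [hlen1]; exact hx)]
  rw [pvGetSet _ e.1 e.2 _ [] he.1 h1 he.2.2.1 h2]
  rw [pvGetSet _ e.1 x _ [] he.1 h1 hx0 hx]
  by_cases hxe2 : x = e.2
  · by_cases hxe1 : x = e.1 <;> by_cases h21 : e.2 = e.1 <;>
      simp [hxe2, hxe1, h21] <;> aesop
  · by_cases hxe1 : x = e.1 <;> simp [hxe2, hxe1] <;> aesop

theorem pvAdjMem (n : Int) : ∀ (edges : List (Int × Int)) (adj : List (List Int)),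
    adj.length = n.toNat →
    ∀ x v : Int, 0 ≤ x → x < n →
    (v ∈ PySem.List.pyGetD (edges.foldl (pvAdjStep n) adj) x []
      ↔ v ∈ PySem.List.pyGetD adj x [] ∨ ((x, v) ∈ pvValid n edges ∨ (v, x) ∈ pvValid n edges)) := by
  intro edges
  induction edges with
  | nil => intro adj _ x v _ _; simp [pvValid]
  | cons e t ih =>
      intro adj hlen x v hx0 hxn
      rw [List.foldl_cons]
      have hlen' : (pvAdjStep n adj e).length = n.toNat := by rw [pvAdjStep_len]; exact hlen
      rw [ih (pvAdjStep n adj e) hlen' x v hx0 hxn]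
      by_cases he : 0 ≤ e.1 ∧ e.1 < n ∧ 0 ≤ e.2 ∧ e.2 < n
      · rw [pvAdjStep_mem n adj e hlen he x v hx0 hxn]
        have hv : pvValid n (e :: t) = e :: pvValid n t := by
          simp [pvValid, List.filter_cons, he]
        rw [hv]
        constructor
        · rintro ((hm | ⟨hx, hv⟩ | ⟨hx, hv⟩) | hmem | hmem)
          · exact Or.inl hm
          · subst hx; subst hv; exact Or.inr (Or.inl (by simp))
          · subst hx; subst hv; exact Or.inr (Or.inr (by simp))
          · exact Or.inr (Or.inl (by simp [hmem]))
          · exact Or.inr (Or.inr (by simp [hmem]))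
        · rintro (hm | hmem | hmem)
          · exact Or.inl (Or.inl hm)
          · rcases List.mem_cons.mp hmem with h | h
            · exact Or.inl (Or.inr (Or.inl ⟨congrArg Prod.fst h, congrArg Prod.snd h⟩))
            · exact Or.inr (Or.inl h)
          · rcases List.mem_cons.mp hmem with h | h
            · exact Or.inl (Or.inr (Or.inr ⟨congrArg Prod.snd h, congrArg Prod.fst h⟩))
            · exact Or.inr (Or.inr h)
      · have hstep : pvAdjStep n adj e = adj := by unfold pvAdjStep; rw [if_neg he]
        have hv : pvValid n (e :: t) = pvValid n t := by
          simp only [pvValid, List.filter_cons]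
          rw [if_neg (by simpa using he)]
        rw [hstep, hv]

theorem pvStep_mem (visited acc : PySem.Set Int) (p : Int × Int) (v : Int) :
    (v ∈ (if PySem.Set.contains visited p.2 && !PySem.Set.contains visited p.1
      then PySem.Set.add (if PySem.Set.contains visited p.1 && !PySem.Set.contains visited p.2
        then PySem.Set.add acc p.2 else acc) p.1
      else (if PySem.Set.contains visited p.1 && !PySem.Set.contains visited p.2
        then PySem.Set.add acc p.2 else acc))
    ↔ v ∈ acc ∨ (v ∉ visited ∧ ((p.1 ∈ visited ∧ v = p.2) ∨ (p.2 ∈ visited ∧ v = p.1)))) := by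
  split_ifs with h1 h2 h2 <;>
    simp only [Bool.and_eq_true, Bool.not_eq_true', ← Bool.not_eq_true,
      PySem.Set.contains_iff, PySem.Set.mem_add] at h1 h2 ⊢ <;>
    constructor <;> intro h <;> aesop

theorem pvRound_mem (visited : PySem.Set Int) (valid : List (Int × Int)) (v : Int) :
    v ∈ pvRound valid visited
      ↔ v ∉ visited ∧ ∃ u, u ∈ visited ∧ ((u, v) ∈ valid ∨ (v, u) ∈ valid) := by
  suffices H : ∀ (l : List (Int × Int)) (acc : PySem.Set Int),
      (v ∈ l.foldl (fun nxt p =>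
        let nxt1 := if PySem.Set.contains visited p.1 && !PySem.Set.contains visited p.2
          then PySem.Set.add nxt p.2 else nxt
        if PySem.Set.contains visited p.2 && !PySem.Set.contains visited p.1
          then PySem.Set.add nxt1 p.1 else nxt1) acc
      ↔ v ∈ acc ∨ (v ∉ visited ∧ ∃ u, u ∈ visited ∧ ((u, v) ∈ l ∨ (v, u) ∈ l))) by
    rw [pvRound, H valid PySem.Set.empty]
    simp [PySem.Set.empty]
  intro l
  induction l with
  | nil => intro acc; simp
  | cons p t ih =>
      intro acc
      rw [List.foldl_cons, ih, pvStep_mem]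
      constructor
      · rintro ((hm | ⟨hnv, hcase⟩) | ⟨hnv, u, hu, he⟩)
        · exact Or.inl hm
        · rcases hcase with ⟨ha, hb⟩ | ⟨ha, hb⟩
          · exact Or.inr ⟨hnv, p.1, ha, Or.inl (by simp [hb])⟩
          · exact Or.inr ⟨hnv, p.2, ha, Or.inr (by simp [hb])⟩
        · exact Or.inr ⟨hnv, u, hu, by simp only [List.mem_cons] at he ⊢; tauto⟩
      · rintro (hm | ⟨hnv, u, hu, he⟩)
        · exact Or.inl (Or.inl hm)
        · rcases he with he | he
          · rcases List.mem_cons.mp he with he | he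
            · have h1 : u = p.1 := congrArg Prod.fst he
              have h2 : v = p.2 := congrArg Prod.snd he
              subst h1
              exact Or.inl (Or.inr ⟨hnv, Or.inl ⟨hu, h2⟩⟩)
            · exact Or.inr ⟨hnv, u, hu, Or.inl he⟩
          · rcases List.mem_cons.mp he with he | he
            · have h1 : v = p.1 := congrArg Prod.fst he
              have h2 : u = p.2 := congrArg Prod.snd he
              subst h2
              exact Or.inl (Or.inr ⟨hnv, Or.inr ⟨hu, h1⟩⟩)
            · exact Or.inr ⟨hnv, u, hu, Or.inr he⟩

theorem pvBloopT_mem (seeds : List Int) (valid : List (Int × Int)) :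
    ∀ (t : Nat) (visited : PySem.Set Int) (j : Nat),
      (∀ v, v ∈ visited ↔ pvReach seeds valid j v) →
      ∀ v, (v ∈ pvBloopT valid t visited ↔ pvReach seeds valid (j + t) v) := by
  intro t
  induction t with
  | zero =>
      intro visited j hv v
      simpa [pvBloopT] using hv v
  | succ t ih =>
      intro visited j hv v
      rw [pvBloopT]
      have hnxt : ∀ w, w ∈ pvRound valid visited ↔
          (¬ pvReach seeds valid j w ∧ ∃ u, pvReach seeds valid j u ∧ ((u, w) ∈ valid ∨ (w, u) ∈ valid)) := by
        intro w
        rw [pvRound_mem]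
        constructor
        · rintro ⟨hnw, u, hu, he⟩
          exact ⟨fun hr => hnw ((hv w).mpr hr), u, (hv u).mp hu, he⟩
        · rintro ⟨hnw, u, hu, he⟩
          exact ⟨fun hw => hnw ((hv w).mp hw), u, (hv u).mpr hu, he⟩
      by_cases hempty : pvRound valid visited = []
      · rw [if_pos hempty]
        have hsat : ∀ w, pvReach seeds valid (j + 1) w → pvReach seeds valid j w := by
          rintro w (hr | ⟨u, hu, he⟩)
          · exact hr
          · by_contra hnr
            have : w ∈ pvRound valid visited := (hnxt w).mpr ⟨hnr, u, hu, he⟩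
            rw [hempty] at this
            simp at this
        rw [hv v]
        have := pvReach_sat seeds valid (i := j) (by intro w hw; exact hsat w hw) (j + (t+1)) (by omega) v
        exact (Iff.symm this)
      · rw [if_neg hempty]
        have hv' : ∀ w, w ∈ PySem.Set.union visited (pvRound valid visited) ↔ pvReach seeds valid (j + 1) w := by
          intro w
          rw [PySem.Set.mem_union, hv w, hnxt w]
          constructor
          · rintro (hr | ⟨hnr, u, hu, he⟩)
            · exact Or.inl hr
            · exact Or.inr ⟨u, hu, he⟩
          · rintro (hr | ⟨u, hu, he⟩)
            · exact Or.inl hr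
            · by_cases hw : pvReach seeds valid j w
              · exact Or.inl hw
              · exact Or.inr ⟨hw, u, hu, he⟩
        have := ih _ (j + 1) hv' v
        rw [this]
        have : j + 1 + t = j + (t + 1) := by omega
        rw [this]

structure pvInv (n k : Int) (seeds : List Int) (valid : List (Int × Int)) (adjL : List (List Int))
    (i : Nat) (dist : List Int) (F G : List Int) : Prop where
  len : dist.length = n.toNat
  ik : (i : Int) ≤ k
  hF : ∀ v ∈ F, (0 ≤ v ∧ v < n) ∧ PySem.List.pyGetD dist v (-1) = (i : Int) ∧ pvExact seeds valid i v
  hG : ∀ v ∈ G, (0 ≤ v ∧ v < n) ∧ PySem.List.pyGetD dist v (-1) = (i : Int) + 1 ∧ pvExact seeds valid (i+1) v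
  disc : ∀ j : Int, 0 ≤ j → j < n → (¬ PySem.List.pyGetD dist j (-1) = -1 ↔ (pvReach seeds valid i j ∨ j ∈ G))
  bound : ∀ j : Int, 0 ≤ j → j < n → ¬ PySem.List.pyGetD dist j (-1) = -1 → PySem.List.pyGetD dist j (-1) ≤ k
  cover : (i : Int) < k → ∀ v, pvExact seeds valid (i+1) v → (v ∈ G ∨ ∃ u ∈ F, v ∈ PySem.List.pyGetD adjL u [])
  last : (i : Int) = k → G = []

theorem pvAinner_spec (n k : Int) (seeds : List Int) (valid : List (Int × Int))
    (hrange : ∀ (i : Nat) (v : Int), pvReach seeds valid i v → 0 ≤ v ∧ v < n) :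
    ∀ (neigh : List Int) (dist q : List Int) (u : Int) (i : Nat),
      dist.length = n.toNat →
      (0 ≤ u ∧ u < n) →
      PySem.List.pyGetD dist u (-1) = (i : Int) →
      pvReach seeds valid i u →
      (∀ v ∈ neigh, (u, v) ∈ valid ∨ (v, u) ∈ valid) →
      (∀ j : Int, 0 ≤ j → j < n → PySem.List.pyGetD dist j (-1) = -1 → ¬ pvReach seeds valid i j) →
      ∃ Δ : List Int,
        (pvAinner dist q u neigh).1.length = n.toNat ∧
        (pvAinner dist q u neigh).2 = q ++ Δ ∧
        (∀ v ∈ Δ, (0 ≤ v ∧ v < n) ∧ PySem.List.pyGetD (pvAinner dist q u neigh).1 v (-1) = (i : Int) + 1 ∧ pvExact seeds valid (i+1) v) ∧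
        (∀ j : Int, 0 ≤ j → j < n → ¬ PySem.List.pyGetD dist j (-1) = -1 →
            PySem.List.pyGetD (pvAinner dist q u neigh).1 j (-1) = PySem.List.pyGetD dist j (-1)) ∧
        (∀ j : Int, 0 ≤ j → j < n → (¬ PySem.List.pyGetD (pvAinner dist q u neigh).1 j (-1) = -1 ↔ (¬ PySem.List.pyGetD dist j (-1) = -1 ∨ j ∈ Δ))) ∧
        (∀ w ∈ neigh, ¬ PySem.List.pyGetD (pvAinner dist q u neigh).1 w (-1) = -1) ∧
        ((pvAinner dist q u neigh).1.count (-1) + Δ.length = dist.count (-1)) := by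
  intro neigh
  induction neigh with
  | nil =>
      intro dist q u i hlen hu hdu hru hneigh hdisc
      exact ⟨[], hlen, by simp [pvAinner], by simp, fun j _ _ _ => rfl,
        fun j h0 hn => by simp [pvAinner], by simp, by simp [pvAinner]⟩
  | cons v rest ih =>
      intro dist q u i hlen hu hdu hru hneigh hdisc
      have hedge : (u, v) ∈ valid ∨ (v, u) ∈ valid := hneigh v (by simp)
      have hrv : pvReach seeds valid (i+1) v := Or.inr ⟨u, hru, hedge⟩
      have hv : 0 ≤ v ∧ v < n := hrange (i+1) v hrv
      by_cases hdv : PySem.List.pyGetD dist v (-1) = -1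
      · -- new node discovered
        set dist' := PySem.List.pySetD dist v ((i : Int) + 1) with hdist'
        have hstep : pvAinner dist q u (v :: rest) = pvAinner dist' (q ++ [v]) u rest := by
          rw [pvAinner, if_pos hdv, hdu]
        have hlen' : dist'.length = n.toNat := by
          rw [hdist', PySem.List.length_pySetD]; exact hlen
        have hget : ∀ x : Int, 0 ≤ x → x < n →
            PySem.List.pyGetD dist' x (-1)
              = if x = v then (i : Int) + 1 else PySem.List.pyGetD dist x (-1) := by
          intro x hx0 hxn
          exact pvGetSet dist v x _ (-1) hv.1 (by rw [hlen]; omega) hx0 (by rw [hlen]; omega)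
        have hgetv : PySem.List.pyGetD dist' v (-1) = (i : Int) + 1 := by
          rw [hget v hv.1 hv.2, if_pos rfl]
        have hgetne : ∀ x : Int, 0 ≤ x → x < n → ¬ x = v →
            PySem.List.pyGetD dist' x (-1) = PySem.List.pyGetD dist x (-1) := by
          intro x hx0 hxn hxv
          rw [hget x hx0 hxn, if_neg hxv]
        have hdnv : ¬ PySem.List.pyGetD dist' v (-1) = -1 := by rw [hgetv]; omega
        have hdu' : PySem.List.pyGetD dist' u (-1) = (i : Int) := by
          by_cases huv : u = v
          · subst huv; rw [hdu] at hdv; omega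
          · rw [hgetne u hu.1 hu.2 huv]; exact hdu
        have hdisc' : ∀ j : Int, 0 ≤ j → j < n →
            PySem.List.pyGetD dist' j (-1) = -1 → ¬ pvReach seeds valid i j := by
          intro j h0 hn hj
          by_cases hjv : j = v
          · subst hjv; rw [hgetv] at hj; omega
          · rw [hgetne j h0 hn hjv] at hj; exact hdisc j h0 hn hj
        obtain ⟨Δ, c1, c2, c3, c4, c5, c6, c7⟩ :=
          ih dist' (q ++ [v]) u i hlen' hu hdu' hru
            (fun w hw => hneigh w (by simp [hw])) hdisc'
        have hfinv : PySem.List.pyGetD (pvAinner dist' (q ++ [v]) u rest).1 v (-1) = (i : Int) + 1 := by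
          rw [c4 v hv.1 hv.2 hdnv, hgetv]
        refine ⟨v :: Δ, by rw [hstep]; exact c1, by rw [hstep, c2]; simp, ?_, ?_, ?_, ?_, ?_⟩
        · -- Δ properties
          intro w hw
          rcases List.mem_cons.mp hw with hwv | hwd
          · subst hwv
            refine ⟨hv, by rw [hstep]; exact hfinv, hrv, ?_⟩
            intro j hj hr
            exact hdisc w hv.1 hv.2 hdv (pvReach_mono seeds valid (by omega : j ≤ i) hr)
          · have := c3 w hwd
            rw [hstep]
            exact this
        · -- preservation
          intro j h0 hn hj
          have hjv : ¬ j = v := fun h => hj (h ▸ hdv)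
          have hpres := hgetne j h0 hn hjv
          rw [hstep, c4 j h0 hn (by rw [hpres]; exact hj), hpres]
        · -- discovered iff
          intro j h0 hn
          rw [hstep, c5 j h0 hn]
          by_cases hjv : j = v
          · subst hjv
            simp only [hgetv, List.mem_cons]
            constructor
            · intro _; simp
            · intro _; omega
          · rw [hgetne j h0 hn hjv]
            simp only [List.mem_cons]
            constructor
            · rintro (h | h)
              · exact Or.inl h
              · exact Or.inr (Or.inr h)
            · rintro (h | h | h)
              · exact Or.inl h
              · exact absurd h hjv
              · exact Or.inr h
        · -- all of neigh discovered
          intro w hw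
          rcases List.mem_cons.mp hw with hwv | hwr
          · subst hwv
            rw [hstep, hfinv]
            omega
          · rw [hstep]; exact c6 w hwr
        · -- count
          rw [hstep]
          have hcnt : dist'.count (-1) + 1 = dist.count (-1) := by
            rw [hdist', PySem.List.pySetD_of_nonneg dist _ hv.1]
            apply pvCountSet ((i : Int) + 1) (by omega) dist v.toNat (by rw [hlen]; omega)
            rw [PySem.List.pyGetD_eq_getElem dist (-1) hv.1 (by rw [hlen]; push_cast; omega)] at hdv
            rw [List.getElem!_eq_getElem?_getD]
            rw [List.getElem?_eq_getElem (by rw [hlen]; omega)]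
            simpa using hdv
          simp only [List.length_cons]
          omega
      · -- already discovered
        have hstep : pvAinner dist q u (v :: rest) = pvAinner dist q u rest := by
          rw [pvAinner, if_neg hdv]
        obtain ⟨Δ, c1, c2, c3, c4, c5, c6, c7⟩ :=
          ih dist q u i hlen hu hdu hru (fun w hw => hneigh w (by simp [hw])) hdisc
        refine ⟨Δ, by rw [hstep]; exact c1, by rw [hstep]; exact c2, by rw [hstep]; exact c3,
          by rw [hstep]; exact c4, by rw [hstep]; exact c5, ?_, by rw [hstep]; exact c7⟩
        intro w hw
        rcases List.mem_cons.mp hw with hwv | hwr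
        · subst hwv
          rw [hstep, c4 w hv.1 hv.2 hdv]
          exact hdv
        · rw [hstep]; exact c6 w hwr

theorem pvInv_shift (n k : Int) (seeds : List Int) (valid : List (Int × Int)) (adjL : List (List Int))
    (hrange : ∀ (i : Nat) (v : Int), pvReach seeds valid i v → 0 ≤ v ∧ v < n)
    (hadj : ∀ u : Int, 0 ≤ u → u < n → ∀ v : Int, (v ∈ PySem.List.pyGetD adjL u [] ↔ ((u, v) ∈ valid ∨ (v, u) ∈ valid)))
    (i : Nat) (dist G : List Int)
    (hInv : pvInv n k seeds valid adjL i dist [] G) (hG : G ≠ []) :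
    pvInv n k seeds valid adjL (i+1) dist G [] := by
  have hik : (i : Int) < k := by
    rcases lt_or_eq_of_le hInv.ik with h | h
    · exact h
    · exact absurd (hInv.last h) hG
  have hexact : ∀ v, pvExact seeds valid (i+1) v → v ∈ G := by
    intro v hv
    rcases hInv.cover hik v hv with h | ⟨u, hu, _⟩
    · exact h
    · simp at hu
  have hreach1 : ∀ j : Int, pvReach seeds valid (i+1) j ↔ (pvReach seeds valid i j ∨ j ∈ G) := by
    intro j
    constructor
    · intro hr
      by_cases hri : pvReach seeds valid i j
      · exact Or.inl hri
      · refine Or.inr (hexact j ⟨hr, ?_⟩)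
        intro j' hj' hr'
        exact hri (pvReach_mono seeds valid (by omega : j' ≤ i) hr')
    · rintro (hr | hg)
      · exact pvReach_mono seeds valid (by omega) hr
      · exact (hInv.hG j hg).2.2.1
  refine ⟨hInv.len, by push_cast; omega, ?_, by simp, ?_, hInv.bound, ?_, ?_⟩
  · intro v hvG
    obtain ⟨hr, hd, he⟩ := hInv.hG v hvG
    exact ⟨hr, by push_cast; exact hd, he⟩
  · intro j h0 hn
    rw [hInv.disc j h0 hn, ← hreach1 j]
    simp
  · intro hik1 v hv
    obtain ⟨hr2, hmin⟩ := hv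
    rcases hr2 with hr1 | ⟨u, hu1, he⟩
    · exact absurd hr1 (hmin (i+1) (by omega))
    · have hnu : ¬ pvReach seeds valid i u := by
        intro hui
        exact hmin (i+1) (by omega) (Or.inr ⟨u, hui, he⟩)
      have huG : u ∈ G := by
        apply hexact u
        refine ⟨hu1, ?_⟩
        intro j' hj' hr'
        exact hnu (pvReach_mono seeds valid (by omega : j' ≤ i) hr')
      have hur := hrange (i+1) u hu1
      refine Or.inr ⟨u, huG, ?_⟩
      rw [hadj u hur.1 hur.2 v]
      exact he
  · intro h
    rfl

theorem pvInv_final (n k : Int) (seeds : List Int) (valid : List (Int × Int)) (adjL : List (List Int))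
    (hk : 0 ≤ k)
    (i : Nat) (dist : List Int)
    (hInv : pvInv n k seeds valid adjL i dist [] []) :
    ∀ j : Int, 0 ≤ j → j < n → (¬ PySem.List.pyGetD dist j (-1) = -1 ↔ pvReach seeds valid k.toNat j) := by
  have hreach : ∀ j : Int, pvReach seeds valid k.toNat j ↔ pvReach seeds valid i j := by
    rcases lt_or_eq_of_le hInv.ik with hik | hik
    · have hsat : ∀ v, pvReach seeds valid (i + 1) v → pvReach seeds valid i v := by
        intro v hv
        by_cases hri : pvReach seeds valid i v
        · exact hri
        · have hex : pvExact seeds valid (i+1) v := by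
            refine ⟨hv, ?_⟩
            intro j' hj' hr'
            exact hri (pvReach_mono seeds valid (by omega : j' ≤ i) hr')
          rcases hInv.cover hik v hex with h | ⟨u, hu, _⟩
          · simp at h
          · simp at hu
      exact fun j => pvReach_sat seeds valid hsat k.toNat (by omega) j
    · have : i = k.toNat := by omega
      subst this
      exact fun j => Iff.rfl
  intro j h0 hn
  rw [hInv.disc j h0 hn, hreach j]
  simp

theorem pvAloop_spec (n k : Int) (seeds : List Int) (valid : List (Int × Int)) (adjL : List (List Int))
    (hk : 0 ≤ k)
    (hrange : ∀ (i : Nat) (v : Int), pvReach seeds valid i v → 0 ≤ v ∧ v < n)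
    (hadj : ∀ u : Int, 0 ≤ u → u < n → ∀ v : Int, (v ∈ PySem.List.pyGetD adjL u [] ↔ ((u, v) ∈ valid ∨ (v, u) ∈ valid))) :
    ∀ (fuel : Nat) (i : Nat) (dist F G : List Int),
      pvInv n k seeds valid adjL i dist F G →
      dist.count (-1) + (F ++ G).length ≤ fuel →
      (pvAloop k adjL fuel dist (F ++ G)).length = n.toNat ∧
      ∀ j : Int, 0 ≤ j → j < n →
        ((¬ PySem.List.pyGetD (pvAloop k adjL fuel dist (F ++ G)) j (-1) = -1 ↔ pvReach seeds valid k.toNat j) ∧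
         (¬ PySem.List.pyGetD (pvAloop k adjL fuel dist (F ++ G)) j (-1) = -1 → PySem.List.pyGetD (pvAloop k adjL fuel dist (F ++ G)) j (-1) ≤ k)) := by
  intro fuel
  induction fuel with
  | zero =>
      intro i dist F G hInv hfuel
      have hF : F = [] := by
        cases F with
        | nil => rfl
        | cons a t => simp at hfuel
      have hG : G = [] := by
        cases G with
        | nil => rfl
        | cons a t => subst hF; simp at hfuel
      subst hF; subst hG
      refine ⟨hInv.len, fun j h0 hn => ⟨pvInv_final n k seeds valid adjL hk i dist hInv j h0 hn, hInv.bound j h0 hn⟩⟩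
  | succ fuel IH =>
      intro i dist F G hInv hfuel
      -- reduce to the case where the head of the queue is in F
      suffices HPOP : ∀ (i : Nat) (F G : List Int), F ≠ [] →
          pvInv n k seeds valid adjL i dist F G →
          dist.count (-1) + (F ++ G).length ≤ fuel + 1 →
          (pvAloop k adjL (fuel+1) dist (F ++ G)).length = n.toNat ∧
          ∀ j : Int, 0 ≤ j → j < n →
            ((¬ PySem.List.pyGetD (pvAloop k adjL (fuel+1) dist (F ++ G)) j (-1) = -1 ↔ pvReach seeds valid k.toNat j) ∧
             (¬ PySem.List.pyGetD (pvAloop k adjL (fuel+1) dist (F ++ G)) j (-1) = -1 → PySem.List.pyGetD (pvAloop k adjL (fuel+1) dist (F ++ G)) j (-1) ≤ k)) by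
        cases F with
        | cons a t => exact HPOP i (a :: t) G (by simp) hInv hfuel
        | nil =>
          cases G with
          | nil =>
              refine ⟨hInv.len, fun j h0 hn => ⟨pvInv_final n k seeds valid adjL hk i dist hInv j h0 hn, hInv.bound j h0 hn⟩⟩
          | cons g t =>
              have hInv' := pvInv_shift n k seeds valid adjL hrange hadj i dist (g :: t) hInv (by simp)
              have h1 : ([] : List Int) ++ g :: t = (g :: t) ++ [] := by simp
              rw [h1] at hfuel ⊢
              exact HPOP (i+1) (g :: t) [] (by simp) hInv' hfuel
      intro i F G hFne hInv hfuel
      cases F with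
      | nil => exact absurd rfl hFne
      | cons u F' =>
      clear hFne
      obtain ⟨hu, hdu, hexu⟩ := hInv.hF u (by simp)
      have hq : (u :: F') ++ G = u :: (F' ++ G) := by simp
      rw [hq] at hfuel ⊢
      by_cases hskip : k ≤ PySem.List.pyGetD dist u (-1)
      · -- dist[u] >= k_hops: continue
        have hik : (i : Int) = k := by
          have := hInv.ik
          rw [hdu] at hskip
          omega
        have hGnil : G = [] := hInv.last hik
        subst hGnil
        have hstep : pvAloop k adjL (fuel+1) dist (u :: (F' ++ [])) = pvAloop k adjL fuel dist (F' ++ []) := by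
          rw [pvAloop, if_pos hskip]
        have hInv' : pvInv n k seeds valid adjL i dist F' [] := by
          refine ⟨hInv.len, hInv.ik, fun v hv => hInv.hF v (by simp [hv]), by simp,
            hInv.disc, hInv.bound, ?_, fun _ => rfl⟩
          intro hlt
          rw [hik] at hlt
          omega
        rw [hstep]
        exact IH i dist F' [] hInv' (by simp at hfuel ⊢; omega)
      · -- expand u
        have hik : (i : Int) < k := by rw [hdu] at hskip; omega
        obtain ⟨Δ, c1, c2, c3, c4, c5, c6, c7⟩ :=
          pvAinner_spec n k seeds valid hrange (PySem.List.pyGetD adjL u []) dist (F' ++ G) u i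
            hInv.len hu hdu hexu.1
            (fun w hw => (hadj u hu.1 hu.2 w).mp hw)
            (fun j h0 hn hj => fun hr => ((hInv.disc j h0 hn).mpr (Or.inl hr)) hj)
        set s := pvAinner dist (F' ++ G) u (PySem.List.pyGetD adjL u []) with hs
        have hstep : pvAloop k adjL (fuel+1) dist (u :: (F' ++ G)) = pvAloop k adjL fuel s.1 s.2 := by
          rw [pvAloop, if_neg hskip]
        have hG2 : s.2 = F' ++ (G ++ Δ) := by rw [c2]; simp
        have hpresF : ∀ v ∈ F', PySem.List.pyGetD s.1 v (-1) = PySem.List.pyGetD dist v (-1) := by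
          intro v hv
          obtain ⟨hvr, hvd, _⟩ := hInv.hF v (by simp [hv])
          exact c4 v hvr.1 hvr.2 (by rw [hvd]; omega)
        have hpresG : ∀ v ∈ G, PySem.List.pyGetD s.1 v (-1) = PySem.List.pyGetD dist v (-1) := by
          intro v hv
          obtain ⟨hvr, hvd, _⟩ := hInv.hG v hv
          exact c4 v hvr.1 hvr.2 (by rw [hvd]; omega)
        have hInv' : pvInv n k seeds valid adjL i s.1 F' (G ++ Δ) := by
          refine ⟨c1, hInv.ik, ?_, ?_, ?_, ?_, ?_, ?_⟩
          · intro v hv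
            obtain ⟨hvr, hvd, hve⟩ := hInv.hF v (by simp [hv])
            exact ⟨hvr, by rw [hpresF v hv]; exact hvd, hve⟩
          · intro v hv
            rcases List.mem_append.mp hv with hvG | hvΔ
            · obtain ⟨hvr, hvd, hve⟩ := hInv.hG v hvG
              exact ⟨hvr, by rw [hpresG v hvG]; exact hvd, hve⟩
            · exact c3 v hvΔ
          · intro j h0 hn
            rw [c5 j h0 hn, hInv.disc j h0 hn]
            simp only [List.mem_append]
            tauto
          · intro j h0 hn hj
            rcases (c5 j h0 hn).mp hj with hold | hΔ
            · rw [c4 j h0 hn hold]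
              exact hInv.bound j h0 hn hold
            · rw [(c3 j hΔ).2.1]
              omega
          · intro _ w hw
            rcases hInv.cover hik w hw with hwG | ⟨u'', hu'', hwadj⟩
            · exact Or.inl (by simp [hwG])
            · rcases List.mem_cons.mp hu'' with hu2 | hu2
              · subst hu2
                have hwdisc := c6 w hwadj
                have hwr := hrange (i+1) w hw.1
                rcases (c5 w hwr.1 hwr.2).mp hwdisc with hold | hΔ
                · rcases (hInv.disc w hwr.1 hwr.2).mp hold with hri | hG
                  · exact absurd hri (hw.2 i (by omega))
                  · exact Or.inl (by simp [hG])
                · exact Or.inl (by simp [hΔ])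
              · exact Or.inr ⟨u'', hu2, hwadj⟩
          · intro hik2
            rw [hik2] at hik
            omega
        rw [hstep, hG2]
        apply IH i s.1 F' (G ++ Δ) hInv'
        have := c7
        simp only [List.length_cons, List.length_append] at hfuel ⊢
        omega

theorem pvAloop_drain (k : Int) (adjL : List (List Int)) :
    ∀ (fuel : Nat) (dist q : List Int), q.length ≤ fuel →
      (∀ u ∈ q, k ≤ PySem.List.pyGetD dist u (-1)) →
      pvAloop k adjL fuel dist q = dist := by
  intro fuel
  induction fuel with
  | zero =>
      intro dist q hq _
      have : q = [] := by cases q with | nil => rfl | cons a t => simp at hq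
      subst this
      rfl
  | succ fuel ih =>
      intro dist q hq hall
      cases q with
      | nil => rfl
      | cons u t =>
          rw [pvAloop, if_pos (hall u (by simp))]
          exact ih dist t (by simp at hq; omega) (fun w hw => hall w (by simp [hw]))

theorem pv_main (n_nodes : Int) (node_to_line : List (Int × Int)) (start_lines : List Int) (k_hops : Int) (edges : List (Int × Int))
    (hpre : n_nodes = 0 ∨ ∀ p ∈ (PySem.Dict.ofList node_to_line).items, p.2 ∈ start_lines → 0 ≤ p.1 ∧ p.1 < n_nodes) :
    k_hop_slice_mask n_nodes node_to_line start_lines k_hops edges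
      = k_hop_slice_mask_alt n_nodes node_to_line start_lines k_hops edges := by
  unfold k_hop_slice_mask k_hop_slice_mask_alt
  by_cases h1 : n_nodes = 0 ∨ start_lines = []
  · rw [if_pos h1, if_pos h1]
  rw [if_neg h1, if_neg h1]
  simp only []
  by_cases h2 : pvSeeds node_to_line start_lines = []
  · rw [if_pos h2, if_pos h2]
  rw [if_neg h2, if_neg h2]
  set seeds := pvSeeds node_to_line start_lines with hseeds_def
  set valid := pvValid n_nodes edges with hvalid_def
  have hn0 : ¬ n_nodes = 0 := fun h => h1 (Or.inl h)
  have hpre' : ∀ p ∈ (PySem.Dict.ofList node_to_line).items, p.2 ∈ start_lines → 0 ≤ p.1 ∧ p.1 < n_nodes := by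
    rcases hpre with h | h
    · exact absurd h hn0
    · exact h
  have hseeds : ∀ s ∈ seeds, 0 ≤ s ∧ s < n_nodes := by
    intro s hs
    rw [hseeds_def] at hs
    unfold pvSeeds at hs
    obtain ⟨p, hp, hps⟩ := List.mem_map.mp hs
    have hmf := List.mem_filter.mp hp
    refine hps ▸ hpre' p hmf.1 ?_
    have h2 := hmf.2
    rw [PySem.Set.contains_iff, PySem.Set.mem_ofList] at h2
    exact h2
  have hnpos : 0 < n_nodes := by
    obtain ⟨s, hs⟩ := List.exists_mem_of_ne_nil _ h2
    have := hseeds s hs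
    omega
  have hrange := pvReach_range (n := n_nodes) (edges := edges) hseeds
  -- adjacency characterization
  set adjL := edges.foldl (pvAdjStep n_nodes) (List.replicate n_nodes.toNat ([] : List Int)) with hadjL_def
  have hadj : ∀ u : Int, 0 ≤ u → u < n_nodes →
      ∀ v : Int, (v ∈ PySem.List.pyGetD adjL u [] ↔ ((u, v) ∈ valid ∨ (v, u) ∈ valid)) := by
    intro u h0 hn v
    rw [hadjL_def, pvAdjMem n_nodes edges _ (by simp) u v h0 hn]
    have hbase : PySem.List.pyGetD (List.replicate n_nodes.toNat ([] : List Int)) u [] = [] := by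
      rw [PySem.List.pyGetD_eq_getElem _ _ h0 (by simp; omega)]
      simp
    rw [hbase]
    simp [hvalid_def]
  -- the initial (dist, q) pair
  rw [PySem.List.foldl_prod_mk (f := fun d s => PySem.List.pySetD d s 0) (g := fun q s => q ++ [s])]
  rw [PySem.List.foldl_append_singleton_eq_self]
  simp only [List.nil_append]
  set distInit := seeds.foldl (fun d s => PySem.List.pySetD d s 0) (List.replicate n_nodes.toNat (-1 : Int)) with hdistInit_def
  have hInitLen : distInit.length = n_nodes.toNat := by
    rw [hdistInit_def, pvInitLen]
    simp
  have hInitGet : ∀ j : Int, 0 ≤ j → j < n_nodes →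
      PySem.List.pyGetD distInit j (-1) = if j ∈ seeds then 0 else -1 := by
    intro j h0 hn
    rw [hdistInit_def, pvInitGet n_nodes seeds _ (by simp) hseeds j h0 hn]
    split
    · rfl
    · rw [PySem.List.pyGetD_eq_getElem _ _ h0 (by simp; omega)]
      simp
  by_cases hk : k_hops < 0
  · -- negative k: A's mask is all False, B returns it directly
    rw [if_pos hk]
    have hdrain : pvAloop k_hops adjL (n_nodes.toNat + seeds.length) distInit seeds = distInit := by
      apply pvAloop_drain
      · omega
      · intro u hu
        rw [hInitGet u (hseeds u hu).1 (hseeds u hu).2, if_pos hu]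
        omega
    rw [hdrain]
    apply List.ext_getElem
    · simp [hInitLen]
    · intro j hj1 hj2
      simp only [List.getElem_map, List.getElem_replicate]
      have hjn : j < n_nodes.toNat := by simpa [hInitLen] using hj1
      have hjget : distInit[j] = PySem.List.pyGetD distInit (j : Int) (-1) := by
        rw [PySem.List.pyGetD_natCast, List.getD_eq_getElem _ _ (by omega)]
      rw [hjget, hInitGet (j : Int) (by omega) (by omega)]
      split <;> simp <;> omega
  · -- k_hops >= 0
    rw [if_neg hk]
    have hk0 : 0 ≤ k_hops := by omega
    have hInv0 : pvInv n_nodes k_hops seeds valid adjL 0 distInit seeds [] := by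
      refine ⟨hInitLen, by omega, ?_, by simp, ?_, ?_, ?_, ?_⟩
      · intro v hv
        refine ⟨hseeds v hv, ?_, hv, ?_⟩
        · rw [hInitGet v (hseeds v hv).1 (hseeds v hv).2, if_pos hv]; rfl
        · intro j hj; omega
      · intro j h0 hn
        rw [hInitGet j h0 hn]
        split
        · next hmem => simp only [List.not_mem_nil, or_false]; constructor
                       · intro _; exact hmem
                       · intro _; omega
        · next hmem => simp only [pvReach]; simp [hmem]
      · intro j h0 hn hne
        rw [hInitGet j h0 hn] at hne ⊢
        split <;> omega
      · intro hlt v hv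
        obtain ⟨hr1, hmin⟩ := hv
        rcases hr1 with hr0 | ⟨u, hu0, he⟩
        · exact absurd hr0 (hmin 0 (by omega))
        · have hur := hrange 0 u hu0
          refine Or.inr ⟨u, hu0, ?_⟩
          rw [hadj u hur.1 hur.2 v]
          exact he
      · intro _
        rfl
    obtain ⟨hlenF, hspec⟩ :=
      pvAloop_spec n_nodes k_hops seeds valid adjL hk0 hrange hadj
        (n_nodes.toNat + seeds.length) 0 distInit seeds [] hInv0
        (by simp only [List.append_nil]
            have hc : distInit.count (-1) ≤ distInit.length := List.count_le_length
            rw [hInitLen] at hc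
            omega)
    simp only [List.append_nil] at hlenF hspec
    set L := pvAloop k_hops adjL (n_nodes.toNat + seeds.length) distInit seeds with hL
    set visited := pvBloop (pvValid n_nodes edges) (PySem.Set.ofList seeds) 0 k_hops with hvis
    have hvmem : ∀ v, v ∈ visited ↔ pvReach seeds valid k_hops.toNat v := by
      have hb := pvBloopT_mem seeds valid (k_hops - 0).toNat (PySem.Set.ofList seeds) 0
        (fun v => by rw [PySem.Set.mem_ofList]; exact ⟨fun h => h, fun h => h⟩)
      intro v
      rw [hvis, hvalid_def] at *
      unfold pvBloop
      have := hb v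
      have ht : (k_hops - 0).toNat = k_hops.toNat := by omega
      rw [ht] at this
      simpa using this
    have hcast : ((n_nodes.toNat : Nat) : Int) = n_nodes := Int.toNat_of_nonneg (by omega)
    have hBr : PySem.List.pyRange 0 n_nodes 1 = (List.range n_nodes.toNat).map (fun m : Nat => (m : Int)) := by
      conv_lhs => rw [← hcast]
      exact PySem.List.pyRange_zero_natCast _
    rw [hBr]
    apply List.ext_getElem
    · rw [List.length_map, hlenF]; simp
    · intro j hj1 hj2
      have hjn : j < n_nodes.toNat := by rw [List.length_map, hlenF] at hj1; exact hj1
      simp only [List.getElem_map, List.getElem_range]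
      have hjg : L[j] = PySem.List.pyGetD L (j : Int) (-1) := by
        rw [PySem.List.pyGetD_natCast, List.getD_eq_getElem _ _ (by omega)]
      obtain ⟨hiff, hbnd⟩ := hspec (j : Int) (by omega) (by push_cast; omega)
      rw [hjg]
      apply Bool.eq_iff_iff.mpr
      rw [decide_eq_true_iff]
      constructor
      · rintro ⟨hne, _⟩
        rw [PySem.Set.contains_iff, hvmem]
        exact hiff.mp hne
      · intro hc
        have hr := (hvmem _).mp ((PySem.Set.contains_iff _ _).mp hc)
        have hne := hiff.mpr hr
        exact ⟨hne, hbnd hne⟩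

-- ===== VERDICT (by name: the statement is the Claim_ definition above) =====
theorem k_hop_slice_mask_spec : Claim_equal_k_hop_slice_mask := by
  intro n_nodes node_to_line start_lines k_hops edges _ hpre
  unfold Spec_k_hop_slice_mask
  unfold Pre_k_hop_slice_mask at hpre
  exact pv_main n_nodes node_to_line start_lines k_hops edges hpre
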